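-- pv_equiv track=rewrite | github.com/lsh23/algorithm-exercise | 그리디/수묶기.py | solve
-- ===== SOURCE A (Python) =====
-- from typing import List, Tuple
--
-- def solve(n: int, numbers: List[int]) -> int:
--
--     answer: int = 0
--
--     zero_cnt = numbers.count(0)
--     one_cnt = numbers.count(1)
--
--     negative_numbers = [ x for x in numbers if x < 0]
--     positive_numbers = [ x for x in numbers if x > 1]
--
--     negative_numbers.sort()
--     positive_numbers.sort(reverse=True)
--
--     len_positive_numbers = len(positive_numbers)
--     if  len_positive_numbers % 2 != 0:
--         for i in range(0,len_positive_numbers-2,2):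
--             answer += (positive_numbers[i]*positive_numbers[i+1])
--         answer += positive_numbers[-1]
--     else:
--         for i in range(0,len_positive_numbers-1,2):
--             answer += (positive_numbers[i]*positive_numbers[i+1])
--
--     len_negative_numbers = len(negative_numbers)
--     if len_negative_numbers % 2 != 0:
--         for i in range(0, len_negative_numbers - 2, 2):
--             answer += (negative_numbers[i] * negative_numbers[i + 1])
--         if (len_negative_numbers == 1 and zero_cnt == 0) or zero_cnt == 0:
--             answer += negative_numbers[-1]
--     else:
--         for i in range(0, len_negative_numbers - 1, 2):
--             answer += (negative_numbers[i] * negative_numbers[i + 1])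
--
--     answer += one_cnt
--
--     return answer
-- ===== SOURCE B (Python) =====
-- def _pair_sum(group):
--     # consume the group two at a time: multiply each adjacent pair,
--     # a lone trailing element is added as-is
--     it = iter(group)
--     total = 0
--     for a in it:
--         b = next(it, None)
--         total += a if b is None else a * b
--     return total
--
--
-- def solve(n, numbers):
--     ones = sum(1 for x in numbers if x == 1)
--     bigs = sorted((x for x in numbers if x > 1), reverse=True)
--     smalls = sorted(x for x in numbers if x <= 0)
--     return ones + _pair_sum(bigs) + _pair_sum(smalls)
-- ===== Notes on version B (the rewrite author's own statement) =====
-- stated objective: simpler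
-- what changed: B counts the ones additively, merges zeros into the <=0 group sorted ascending, and applies one uniform recursive adjacent-pairing pass to each of the two groups, eliminating A's parity-indexed loops and its zero-count special-case branches (a leftover negative naturally pairs with a trailing zero).
import Mathlib
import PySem

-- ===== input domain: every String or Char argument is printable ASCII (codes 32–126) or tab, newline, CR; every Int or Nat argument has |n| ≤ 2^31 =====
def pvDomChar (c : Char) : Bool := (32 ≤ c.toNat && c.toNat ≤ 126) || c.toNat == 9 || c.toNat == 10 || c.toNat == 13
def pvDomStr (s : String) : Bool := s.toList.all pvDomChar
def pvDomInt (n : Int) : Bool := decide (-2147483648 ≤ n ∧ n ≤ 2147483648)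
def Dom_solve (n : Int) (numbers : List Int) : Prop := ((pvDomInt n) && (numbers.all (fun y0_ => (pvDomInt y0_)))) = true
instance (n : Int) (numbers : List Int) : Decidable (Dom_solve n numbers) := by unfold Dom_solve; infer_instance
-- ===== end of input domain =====

-- B merges zeros into the ≤0 group and applies one uniform adjacent-pairing pass per group,
-- removing A's zero-count special cases; objective: simpler (no speed claim).

-- ===== PORT A =====
-- 'for i in range(0, stop, 2): answer += xs[i]*xs[i+1]'  (indices are in range wherever A runs this)
def pairLoop (xs : List Int) (stop : Int) (answer : Int) : Int :=
  (PySem.List.pyRange 0 stop 2).foldl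
    (fun acc i => acc + PySem.List.pyGetD xs i 0 * PySem.List.pyGetD xs (i + 1) 0) answer

def solve (n : Int) (numbers : List Int) : Int :=
  let answer : Int := 0
  let zero_cnt : Int := numbers.count 0
  let one_cnt : Int := numbers.count 1
  let negative_numbers := PySem.List.sorted (numbers.filter (fun x => decide (x < 0))) (fun x => x) false
  let positive_numbers := PySem.List.sorted (numbers.filter (fun x => decide (x > 1))) (fun x => x) true
  let len_positive_numbers : Int := positive_numbers.length
  let answer :=
    if PySem.Int.mod len_positive_numbers 2 ≠ 0 then
      pairLoop positive_numbers (len_positive_numbers - 2) answer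
        + PySem.List.pyGetD positive_numbers (-1) 0
    else
      pairLoop positive_numbers (len_positive_numbers - 1) answer
  let len_negative_numbers : Int := negative_numbers.length
  let answer :=
    if PySem.Int.mod len_negative_numbers 2 ≠ 0 then
      let answer := pairLoop negative_numbers (len_negative_numbers - 2) answer
      if (len_negative_numbers = 1 ∧ zero_cnt = 0) ∨ zero_cnt = 0 then
        answer + PySem.List.pyGetD negative_numbers (-1) 0
      else answer
    else
      pairLoop negative_numbers (len_negative_numbers - 1) answer
  answer + one_cnt

-- ===== PORT B =====
-- Source B's _pair_sum: group[0]*group[1] + _pair_sum(group[2:]); lone element as-is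
def pairSum : List Int → Int
  | a :: b :: t => a * b + pairSum t
  | [a] => a
  | [] => 0

def solve_alt (n : Int) (numbers : List Int) : Int :=
  let ones : Int := (numbers.filter (fun x => x == 1)).length
  let bigs := PySem.List.sorted (numbers.filter (fun x => decide (x > 1))) (fun x => x) true
  let smalls := PySem.List.sorted (numbers.filter (fun x => decide (x ≤ 0))) (fun x => x) false
  ones + pairSum bigs + pairSum smalls

-- ===== PRECONDITION & SPEC =====
def Spec_solve (n : Int) (numbers : List Int) (out : Int) : Prop := out = solve_alt n numbers
instance (n : Int) (numbers : List Int) (out : Int) : Decidable (Spec_solve n numbers out) := by unfold Spec_solve; infer_instance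

-- ===== CLAIM (what is proved, stated in full; the proofs are below) =====
def Claim_equal_solve : Prop := ∀ (n : Int) (numbers : List Int), Dom_solve n numbers → Spec_solve n numbers (solve n numbers)

-- ===== LEMMAS AND PROOFS =====

-- the loop body's summand
def pairTerm (xs : List Int) (i : Int) : Int :=
  PySem.List.pyGetD xs i 0 * PySem.List.pyGetD xs (i + 1) 0

lemma pairLoop_eq_add (xs : List Int) (stop a : Int) :
    pairLoop xs stop a = a + ((PySem.List.pyRange 0 stop 2).map (pairTerm xs)).sum := by
  unfold pairLoop pairTerm
  exact PySem.List.foldl_add _ _ _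

lemma sum_shift (a b : Int) (t : List Int) (stop : Int) (h : -1 ≤ stop) :
    ((PySem.List.pyRange 0 (stop + 2) 2).map (pairTerm (a :: b :: t))).sum
      = a * b + ((PySem.List.pyRange 0 stop 2).map (pairTerm t)).sum := by
  rw [PySem.List.pyRange_of_pos _ _ (by norm_num : (0:Int) < 2),
      PySem.List.pyRange_of_pos _ _ (by norm_num : (0:Int) < 2)]
  have h1 : (0:Int) < stop + 2 := by omega
  rw [if_pos h1]
  have hn : ((stop + 2 - 0 + 2 - 1) / 2).toNat = (if (0:Int) < stop then ((stop - 0 + 2 - 1) / 2).toNat else 0) + 1 := by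
    split_ifs with h2 <;> omega
  rw [hn, List.range_succ_eq_map]
  simp only [List.map_cons, List.map_map, List.sum_cons]
  have hterm0 : pairTerm (a :: b :: t) (0 + 2 * (0:Nat)) = a * b := by
    simp [pairTerm, PySem.List.pyGetD]
  have hshift : ∀ k : Nat, pairTerm (a :: b :: t) (0 + 2 * ((k + 1 : Nat) : Int))
      = pairTerm t (0 + 2 * (k : Int)) := by
    intro k
    have e1 : (0 : Int) + 2 * ((k + 1 : Nat) : Int) = ((2 * k + 2 : Nat) : Int) := by push_cast; ring
    have e3 : (0 : Int) + 2 * ((k : Nat) : Int) = ((2 * k : Nat) : Int) := by push_cast; ring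
    unfold pairTerm
    rw [e1, e3]
    have e2 : ((2 * k + 2 : Nat) : Int) + 1 = ((2 * k + 3 : Nat) : Int) := by push_cast; ring
    have e4 : ((2 * k : Nat) : Int) + 1 = ((2 * k + 1 : Nat) : Int) := by push_cast; ring
    rw [e2, e4]
    simp only [PySem.List.pyGetD_natCast]
    have g1 : (a :: b :: t).getD (2 * k + 2) 0 = t.getD (2 * k) 0 := by
      have h12 : 2 * k + 2 = (2 * k) + 1 + 1 := by omega
      rw [h12, List.getD_cons_succ, List.getD_cons_succ]
    have g2 : (a :: b :: t).getD (2 * k + 3) 0 = t.getD (2 * k + 1) 0 := by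
      have h12 : 2 * k + 3 = (2 * k + 1) + 1 + 1 := by omega
      rw [h12, List.getD_cons_succ, List.getD_cons_succ]
    rw [g1, g2]
  rw [hterm0]
  congr 1
  refine congrArg List.sum (List.map_congr_left ?_)
  intro k _
  simpa [Function.comp, Nat.succ_eq_add_one] using hshift k

lemma pairSum_even : ∀ xs : List Int, xs.length % 2 = 0 →
    ((PySem.List.pyRange 0 ((xs.length : Int) - 1) 2).map (pairTerm xs)).sum = pairSum xs := by
  intro xs
  induction xs using pairSum.induct with
  | case1 a b t ih =>
    intro h
    have hlen : ((a :: b :: t).length : Int) - 1 = ((t.length : Int) - 1) + 2 := by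
      simp; omega
    rw [hlen, sum_shift a b t _ (by omega), pairSum]
    rw [ih (by simp only [List.length_cons] at h; omega)]
  | case2 a => intro h; simp at h
  | case3 =>
    intro _
    rw [PySem.List.pyRange_of_pos _ _ (by norm_num : (0:Int) < 2)]
    simp [pairSum]

lemma pairSum_odd : ∀ (xs : List Int) (h : xs ≠ []), xs.length % 2 = 1 →
    ((PySem.List.pyRange 0 ((xs.length : Int) - 2) 2).map (pairTerm xs)).sum + xs.getLast h = pairSum xs := by
  intro xs
  induction xs using pairSum.induct with
  | case1 a b t ih =>
    intro h hodd
    have ht : t ≠ [] := by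
      intro he; subst he; simp at hodd
    have hlen : ((a :: b :: t).length : Int) - 2 = ((t.length : Int) - 2) + 2 := by
      simp; omega
    have hl : (a :: b :: t).getLast h = t.getLast ht := by
      rw [List.getLast_cons (by simp), List.getLast_cons ht]
    rw [hlen, sum_shift a b t _ (by have := List.length_pos_iff.mpr ht; omega), hl, pairSum,
        add_assoc, ih ht (by simp only [List.length_cons] at hodd; omega)]
  | case2 a =>
    intro h _
    rw [PySem.List.pyRange_of_pos _ _ (by norm_num : (0:Int) < 2)]
    simp [pairSum]
  | case3 => intro h; simp at h

lemma pairSum_replicate_zero : ∀ z : Nat, pairSum (List.replicate z 0) = 0 := by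
  intro z
  induction z using Nat.strong_induction_on with
  | _ z ih =>
    match z with
    | 0 => rfl
    | 1 => rfl
    | (m + 2) =>
      rw [List.replicate_succ, List.replicate_succ, pairSum, ih m (by omega)]
      ring

lemma pairSum_append_even : ∀ (l m : List Int), l.length % 2 = 0 →
    pairSum (l ++ m) = pairSum l + pairSum m := by
  intro l
  induction l using pairSum.induct with
  | case1 a b t ih =>
    intro m h
    simp only [List.cons_append, pairSum]
    rw [ih m (by simp only [List.length_cons] at h; omega)]
    ring
  | case2 a => intro m h; simp at h
  | case3 => intro m _; simp [pairSum]

lemma pairSum_append_odd : ∀ (l : List Int) (hl : l ≠ []) (z : Nat), l.length % 2 = 1 →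
    pairSum (l ++ List.replicate (z + 1) 0) = pairSum l - l.getLast hl := by
  intro l
  induction l using pairSum.induct with
  | case1 a b t ih =>
    intro hl z hodd
    have ht : t ≠ [] := by
      intro he; subst he; simp at hodd
    simp only [List.cons_append, pairSum]
    rw [ih ht z (by simp only [List.length_cons] at hodd; omega)]
    have hlast : (a :: b :: t).getLast hl = t.getLast ht := by
      rw [List.getLast_cons (by simp), List.getLast_cons ht]
    rw [hlast]; ring
  | case2 a =>
    intro hl z _
    rw [List.replicate_succ]
    simp only [List.cons_append, List.nil_append, pairSum]
    rw [pairSum_replicate_zero z]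
    simp
  | case3 => intro hl; simp at hl

-- smalls = negs ++ zeros: the sorted ≤0 group is the sorted negatives followed by the zeros
lemma filter_le_perm (l : List Int) :
    (l.filter (fun x => decide (x ≤ 0))).Perm
      (l.filter (fun x => decide (x < 0)) ++ l.filter (fun x => decide (x = 0))) := by
  induction l with
  | nil => simp
  | cons a t ih =>
    simp only [List.filter_cons]
    by_cases h1 : a < 0
    · rw [decide_eq_true (by omega : a ≤ 0), decide_eq_true h1,
          decide_eq_false (by omega : ¬ a = 0)]
      simpa using ih.cons a
    · by_cases h2 : a = 0
      · rw [decide_eq_true (by omega : a ≤ 0), decide_eq_false (by omega : ¬ a < 0),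
            decide_eq_true h2]
        simpa using (ih.cons a).trans List.perm_middle.symm
      · rw [decide_eq_false (by omega : ¬ a ≤ 0), decide_eq_false (by omega : ¬ a < 0),
            decide_eq_false h2]
        simpa using ih

lemma filter_eq_zero_replicate (l : List Int) :
    l.filter (fun x => decide (x = 0)) = List.replicate (l.count 0) 0 := by
  induction l with
  | nil => simp
  | cons a t ih =>
    by_cases h : a = 0
    · subst h
      simp only [List.filter_cons, List.count_cons]
      simp [List.replicate_succ, ih]
    · simp only [List.filter_cons, List.count_cons]
      rw [decide_eq_false h]
      simp [h, ih]

lemma smalls_eq (numbers : List Int) :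
    PySem.List.sorted (numbers.filter (fun x => decide (x ≤ 0))) (fun x => x) false
      = PySem.List.sorted (numbers.filter (fun x => decide (x < 0))) (fun x => x) false
        ++ List.replicate (numbers.count 0) 0 := by
  rw [← filter_eq_zero_replicate numbers]
  apply PySem.List.sorted_id_eq_of_perm_of_pairwise
  · exact (List.Perm.append_right _ (PySem.List.sorted_perm _ _ _)).trans
      (filter_le_perm numbers).symm
  · apply List.pairwise_append.mpr
    refine ⟨PySem.List.sorted_pairwise _ _, ?_, ?_⟩
    · rw [filter_eq_zero_replicate numbers]
      exact List.pairwise_replicate.mpr (Or.inr le_rfl)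
    · intro x hx y hy
      have hx' : x ∈ numbers.filter (fun x => decide (x < 0)) :=
        (PySem.List.mem_sorted _ _ _ _).mp hx
      have hxlt : x < 0 := by simpa using List.of_mem_filter hx'
      have hy0 : y = 0 := by simpa using List.of_mem_filter hy
      omega

lemma count_one_eq (numbers : List Int) :
    (numbers.count 1 : Int) = ((numbers.filter (fun x => x == 1)).length : Int) := by
  rw [List.count_eq_length_filter]

lemma mod_int_two (L : Nat) : PySem.Int.mod (L : Int) 2 = ((L % 2 : Nat) : Int) := by
  exact_mod_cast PySem.Int.mod_natCast L 2

theorem solve_eq_alt (n : Int) (numbers : List Int) : solve n numbers = solve_alt n numbers := by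
  unfold solve solve_alt
  simp only []
  set negs := PySem.List.sorted (numbers.filter (fun x => decide (x < 0))) (fun x => x) false with hnegs
  set poss := PySem.List.sorted (numbers.filter (fun x => decide (x > 1))) (fun x => x) true with hposs
  rw [smalls_eq numbers, ← hnegs]
  rw [← count_one_eq]
  -- positive part
  have hpos : (if PySem.Int.mod (poss.length : Int) 2 ≠ 0 then
        pairLoop poss ((poss.length : Int) - 2) 0 + PySem.List.pyGetD poss (-1) 0
      else pairLoop poss ((poss.length : Int) - 1) 0) = pairSum poss := by
    rw [mod_int_two]
    by_cases hp : poss.length % 2 = 0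
    · rw [if_neg (by simp [hp]), pairLoop_eq_add]
      rw [pairSum_even poss hp]; ring
    · have hp1 : poss.length % 2 = 1 := by omega
      have hne : poss ≠ [] := by
        intro he; rw [he] at hp1; simp at hp1
      rw [if_pos (by simp [hp1]), pairLoop_eq_add, PySem.List.pyGetD_neg_one poss 0 hne]
      rw [← pairSum_odd poss hne hp1]; ring
  -- negative part, for an arbitrary incoming accumulator
  have hneg : ∀ acc : Int, (if PySem.Int.mod (negs.length : Int) 2 ≠ 0 then
        (if ((negs.length : Int) = 1 ∧ ((numbers.count 0 : Nat) : Int) = 0) ∨ ((numbers.count 0 : Nat) : Int) = 0 then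
          pairLoop negs ((negs.length : Int) - 2) acc + PySem.List.pyGetD negs (-1) 0
        else pairLoop negs ((negs.length : Int) - 2) acc)
      else pairLoop negs ((negs.length : Int) - 1) acc)
      = acc + pairSum (negs ++ List.replicate (numbers.count 0) 0) := by
    intro acc
    generalize numbers.count 0 = z
    rw [mod_int_two]
    by_cases hp : negs.length % 2 = 0
    · rw [if_neg (by simp [hp]), pairLoop_eq_add,
          pairSum_append_even negs _ hp, pairSum_replicate_zero z, pairSum_even negs hp]
      ring
    · have hp1 : negs.length % 2 = 1 := by omega
      have hne : negs ≠ [] := by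
        intro he; rw [he] at hp1; simp at hp1
      rw [if_pos (by simp [hp1])]
      by_cases hzz : z = 0
      · subst hzz
        rw [if_pos (by simp), pairLoop_eq_add, PySem.List.pyGetD_neg_one negs 0 hne]
        simp only [List.replicate_zero, List.append_nil]
        rw [← pairSum_odd negs hne hp1]; ring
      · rw [if_neg (by simp [hzz]), pairLoop_eq_add]
        obtain ⟨z', rfl⟩ : ∃ z', z = z' + 1 := ⟨z - 1, by omega⟩
        rw [pairSum_append_odd negs hne z' hp1, ← pairSum_odd negs hne hp1]
        ring
  rw [hpos, hneg (pairSum poss)]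
  ring

-- ===== VERDICT (by name: the statement is the Claim_ definition above) =====
theorem solve_spec : Claim_equal_solve := by
  intro n numbers _
  unfold Spec_solve
  exact solve_eq_alt n numbers
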